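-- pv_equiv track=rewrite | github.com/pypi-data/pypi-mirror-312 | packages/kurumii/kurumii-1.5.6.4.tar.gz/kurumii-1.5.6.4/kurumii/profanities.py | bypass
-- ===== SOURCE A (Python) =====
-- def bypass(text) -> str:
--     i=0
--     while i < 10:
--         text = text.lower().replace(" ", "").replace(".", "").replace("_", "").replace("-", "").replace("#", "").replace("'", "") \
--             .replace("+", "").replace("*", "").replace("~", "").replace(")", "").replace("`", "").replace("ß", "") \
--             .replace("?", "").replace("=", "").replace("}", "").replace("{", "").replace("(", "").replace(")", "") \
--             .replace("!", "").replace("@", "").replace("$", "").replace("%", "").replace("^", "").replace("&", "") \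
--             .replace("*", "").replace("(", "").replace(")", "").replace("_", "").replace("-", "").replace("+", "") \
--             .replace("=", "").replace("[", "").replace("]", "").replace("{", "").replace("}", "").replace(";", "") \
--             .replace(":", "").replace("<", "").replace(">", "").replace(",", "").replace(".", "").replace("/", "") \
--             .replace("?", "").replace("|", "").replace("\\", "").replace("'", "").replace("‘", "").replace("’", "") \
--             .replace("“", "").replace("”", "").replace("(", "").replace(")", "").replace("=", "").replace("–", "") \
--             .replace("_", "").replace("—", "").replace(" ", "").replace("¡", "").replace("¿", "").replace("3", "e") \
--             .replace("$", "s").replace("1", "i").replace("0", "o").replace("ee", "e").replace("ggg", "gg")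
--         i= i+1
--     return(text)
-- ===== SOURCE B (Python) =====
-- # B: build the char actions once (first replace listed in A wins, so '$' deletes),
-- # normalize in ONE pass over text.lower(), then 10 rounds of the ee/ggg collapse.
-- _DELETE = set(" ._-#'+*~)`\u00df?={}(!@$%^&*[];:<>,./|\\\u2018\u2019\u201c\u201d\u2013\u2014\u00a1\u00bf")
-- _SUBST = {"3": "e", "1": "i", "0": "o"}
--
-- def bypass(text) -> str:
--     text = "".join(_SUBST.get(c, c) for c in text.lower() if c not in _DELETE)
--     for _ in range(10):
--         text = text.replace("ee", "e").replace("ggg", "gg")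
--     return text
-- ===== Notes on version B (the rewrite author's own statement) =====
-- stated objective: simpler
-- what changed: A's 65-step replace chain run 10 times is replaced by a single one-pass normalization (lower once, then a delete-set/substitution-dict pass over the characters, first-listed action winning, so '$' deletes and its later '$'->'s' replace never fires) followed by exactly 10 rounds of the ee/ggg collapse.
import Mathlib
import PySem

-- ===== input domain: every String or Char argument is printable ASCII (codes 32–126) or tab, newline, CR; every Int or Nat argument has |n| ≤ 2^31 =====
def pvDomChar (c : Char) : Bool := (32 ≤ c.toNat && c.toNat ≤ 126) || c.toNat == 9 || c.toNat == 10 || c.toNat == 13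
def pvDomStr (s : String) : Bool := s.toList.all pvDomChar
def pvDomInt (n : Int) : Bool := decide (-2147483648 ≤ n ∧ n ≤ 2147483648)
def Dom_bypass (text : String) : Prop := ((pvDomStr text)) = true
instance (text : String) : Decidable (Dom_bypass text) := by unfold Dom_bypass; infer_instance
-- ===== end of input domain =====

-- B normalizes each character once (delete set + substitution dict, first-listed action wins)
-- and then runs the ten ee/ggg collapse rounds; objective: simpler (not measured faster).

-- ===== PORT A =====
-- one iteration of A's while-loop body: the literal replace chain on text.lower()
def bypassStep (t : String) : String :=
  (PySem.Str.replace (PySem.Str.replace (PySem.Str.replace (PySem.Str.replace (PySem.Str.replace (PySem.Str.replace (PySem.Str.replace (PySem.Str.replace (PySem.Str.replace (PySem.Str.replace (PySem.Str.replace (PySem.Str.replace (PySem.Str.replace (PySem.Str.replace (PySem.Str.replace (PySem.Str.replace (PySem.Str.replace (PySem.Str.replace (PySem.Str.replace (PySem.Str.replace (PySem.Str.replace (PySem.Str.replace (PySem.Str.replace (PySem.Str.replace (PySem.Str.replace (PySem.Str.replace (PySem.Str.replace (PySem.Str.replace (PySem.Str.replace (PySem.Str.replace (PySem.Str.replace (PySem.Str.replace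 (PySem.Str.replace (PySem.Str.replace (PySem.Str.replace (PySem.Str.replace (PySem.Str.replace (PySem.Str.replace (PySem.Str.replace (PySem.Str.replace (PySem.Str.replace (PySem.Str.replace (PySem.Str.replace (PySem.Str.replace (PySem.Str.replace (PySem.Str.replace (PySem.Str.replace (PySem.Str.replace (PySem.Str.replace (PySem.Str.replace (PySem.Str.replace (PySem.Str.replace (PySem.Str.replace (PySem.Str.replace (PySem.Str.replace (PySem.Str.replace (PySem.Str.replace (PySem.Str.replace (PySem.Str.replace (PySem.Str.replace (PySem.Str.replace (PySem.Str.replace (PySem.Str.replace (PySem.Str.replace (PySem.Str.replace (PySem.Str.lower t) " " "") "." "") "_" "") "-" "") "#" "") "'" "") "+" "") "*" "") "~" "") ")" "") "`" "") "ß" "") "?" "") "=" "") "}" "") "{" "") "(" "") ")" "") "!" "") "@" "") "$" "") "%" "") "^" "") "&" "") "*" "") "(" "") ")" "") "_" "") "-" "") "+" "") "=" "") "[" "") "]" "") "{" "") "}" "") ";" "") ":" "") "<" "") ">" "") "," "") "." "") "/" "") "?" "") "|" "") "\\" "") "'" "") "‘" "") "’" "") "“" "") "”" "") "(" "") ")"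 "") "=" "") "–" "") "_" "") "—" "") " " "") "¡" "") "¿" "") "3" "e") "$" "s") "1" "i") "0" "o") "ee" "e") "ggg" "gg")

-- 'i = 0; while i < 10: text = <chain>; i = i + 1' as a countdown recursion
def bypassLoop : Nat → String → String
  | 0, t => t
  | n+1, t => bypassLoop n (bypassStep t)

def bypass (text : String) : String := bypassLoop 10 text

-- ===== PORT B =====
def bDelete : PySem.Set Char := PySem.Set.ofList " ._-#'+*~)`ß?=}{(!@$%^&[];:<>,/|\\‘’“”–—¡¿".toList

def bSubst : PySem.Dict Char Char := PySem.Dict.ofList [('3', 'e'), ('1', 'i'), ('0', 'o')]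

-- 'for _ in range(10): text = text.replace("ee","e").replace("ggg","gg")'
def bCollapse : Nat → String → String
  | 0, t => t
  | n+1, t => bCollapse n (PySem.Str.replace (PySem.Str.replace t "ee" "e") "ggg" "gg")

def bypass_alt (text : String) : String :=
  bCollapse 10 (String.ofList
    (((PySem.Str.lower text).toList.filter (fun c => !(bDelete.contains c))).map
      (fun c => PySem.Dict.getD bSubst c c)))

-- ===== PRECONDITION & SPEC =====
def Spec_bypass (text : String) (out : String) : Prop := out = bypass_alt text
instance (text : String) (out : String) : Decidable (Spec_bypass text out) := by unfold Spec_bypass; infer_instance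

-- ===== CLAIM (what is proved, stated in full; the proofs are below) =====
def Claim_equal_bypass : Prop := ∀ (text : String), Dom_bypass text → Spec_bypass text (bypass text)

-- ===== LEMMAS AND PROOFS =====

-- per-character action of B's one normalization pass
def trB (c : Char) : List Char :=
  if bDelete.contains c then [] else [PySem.Dict.getD bSubst c c]

-- A's 63 single-character replaces (the chain between lower() and the ee/ggg collapse), on char lists
def chainC (u : List Char) : List Char :=
  (PySem.Chars.replace (PySem.Chars.replace (PySem.Chars.replace (PySem.Chars.replace (PySem.Chars.replace (PySem.Chars.replace (PySem.Chars.replace (PySem.Chars.replace (PySem.Chars.replace (PySem.Chars.replace (PySem.Chars.replace (PySem.Chars.replace (PySem.Chars.replace (PySem.Chars.replace (PySem.Chars.replace (PySem.Chars.replace (PySem.Chars.replace (PySem.Chars.replace (PySem.Chars.replace (PySem.Chars.replace (PySem.Chars.replace (PySem.Chars.replace (PySem.Chars.replace (PySem.Chars.replace (PySem.Chars.replace (PySem.Chars.replace (PySem.Chars.replace (PySem.Chars.replace (PySem.Chars.replace (PySem.Chars.replace (PySem.Chars.replace (PySem.Chars.replace (PySem.Chars.replace (PySem.Chars.replace (PySem.Chars.replace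 (PySem.Chars.replace (PySem.Chars.replace (PySem.Chars.replace (PySem.Chars.replace (PySem.Chars.replace (PySem.Chars.replace (PySem.Chars.replace (PySem.Chars.replace (PySem.Chars.replace (PySem.Chars.replace (PySem.Chars.replace (PySem.Chars.replace (PySem.Chars.replace (PySem.Chars.replace (PySem.Chars.replace (PySem.Chars.replace (PySem.Chars.replace (PySem.Chars.replace (PySem.Chars.replace (PySem.Chars.replace (PySem.Chars.replace (PySem.Chars.replace (PySem.Chars.replace (PySem.Chars.replace (PySem.Chars.replace (PySem.Chars.replace (PySem.Chars.replace (PySem.Chars.replace u [' '] []) ['.'] []) ['_'] []) ['-'] []) ['#'] []) ['\''] []) ['+'] []) ['*'] []) ['~'] []) [')'] []) ['`'] []) ['ß'] []) ['?'] []) ['='] []) ['}'] []) ['{'] []) ['('] []) [')'] []) ['!'] []) ['@'] []) ['$'] []) ['%'] []) ['^'] []) ['&'] []) ['*'] []) ['('] []) [')'] []) ['_'] []) ['-'] []) ['+'] []) ['='] []) ['['] []) [']'] []) ['{'] []) ['}'] []) [';'] []) [':'] []) ['<'] []) ['>'] []) [','] []) ['.'] []) ['/'] []) ['?'] []) ['|']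 []) ['\\'] []) ['\''] []) ['‘'] []) ['’'] []) ['“'] []) ['”'] []) ['('] []) [')'] []) ['='] []) ['–'] []) ['_'] []) ['—'] []) [' '] []) ['¡'] []) ['¿'] []) ['3'] ['e']) ['$'] ['s']) ['1'] ['i']) ['0'] ['o'])

-- the ee/ggg collapse of one round, on char lists
def collC (u : List Char) : List Char :=
  PySem.Chars.replace (PySem.Chars.replace u ['e', 'e'] ['e']) ['g', 'g', 'g'] ['g', 'g']

-- every distinct needle character of A's single-char replaces, in first-occurrence order
def needleK : List Char := [' ', '.', '_', '-', '#', '\'', '+', '*', '~', ')', '`', 'ß', '?', '=', '}', '{', '(', '!', '@', '$', '%', '^', '&', '[', ']', ';', ':', '<', '>', ',', '/', '|', '\\', '‘', '’', '“', '”', '–', '—', '¡', '¿', '3', '1', '0']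

-- a character B's normalization pass leaves alone
def GoodC (c : Char) : Prop := PySem.Chars.lowerChar c = c ∧ trB c = [c]

lemma go_single (a : Char) (r : List Char) :
    ∀ (fuel : Nat) (l acc : List Char), l.length ≤ fuel →
      PySem.Chars.replace.go [a] r fuel l acc =
        acc.reverse ++ l.flatMap (fun c => if c == a then r else [c]) := by
  intro fuel
  induction fuel with
  | zero =>
    intro l acc h
    have : l = [] := List.eq_nil_of_length_eq_zero (Nat.le_zero.mp h)
    subst this
    simp [PySem.Chars.replace.go]
  | succ n ih =>
    intro l acc h
    cases l with
    | nil => simp [PySem.Chars.replace.go]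
    | cons c t =>
      by_cases hc : c = a
      · subst hc
        have hpre : [c].isPrefixOf (c :: t) = true := by simp [List.isPrefixOf]
        simp only [PySem.Chars.replace.go, hpre, if_true]
        rw [ih _ _ (by simpa using Nat.le_of_succ_le_succ h)]
        simp
      · have hpre : [a].isPrefixOf (c :: t) = false := by
          simp [List.isPrefixOf]
          exact fun h' => absurd h'.symm hc
        simp only [PySem.Chars.replace.go, hpre, Bool.false_eq_true, if_false]
        rw [ih t (c :: acc) (by simpa using Nat.le_of_succ_le_succ h)]
        simp [hc]

lemma replace_single (s : List Char) (a : Char) (r : List Char) :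
    PySem.Chars.replace s [a] r = s.flatMap (fun c => if c == a then r else [c]) := by
  rw [PySem.Chars.replace]
  simp [go_single a r s.length s [] (le_refl _)]

lemma mem_go {d : Char} (o n : List Char) :
    ∀ (fuel : Nat) (l acc : List Char),
      d ∈ PySem.Chars.replace.go o n fuel l acc → d ∈ acc ∨ d ∈ l ∨ d ∈ n := by
  intro fuel
  induction fuel with
  | zero =>
    intro l acc h
    simp [PySem.Chars.replace.go] at h
    tauto
  | succ m ih =>
    intro l acc h
    cases l with
    | nil => simp [PySem.Chars.replace.go] at h; tauto
    | cons c t =>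
      rw [PySem.Chars.replace.go] at h
      split at h
      · rcases ih _ _ h with h' | h' | h'
        · simp at h'
          rcases h' with h' | h' <;> simp_all
        · right; left; exact List.mem_of_mem_drop h'
        · tauto
      · rcases ih _ _ h with h' | h' | h' <;> simp_all
        tauto

lemma mem_replace {d : Char} (s o n : List Char) (ho : o ≠ [])
    (hd : d ∈ PySem.Chars.replace s o n) : d ∈ s ∨ d ∈ n := by
  rw [PySem.Chars.replace] at hd
  rw [if_neg (by simpa using ho)] at hd
  rcases mem_go o n _ _ _ hd with h | h | h
  · simp at h
  · tauto
  · tauto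

lemma lowerChar_idem (c : Char) :
    PySem.Chars.lowerChar (PySem.Chars.lowerChar c) = PySem.Chars.lowerChar c := by
  unfold PySem.Chars.lowerChar PySem.Chars.isupper
  split_ifs with h1 h2 <;> try rfl
  exfalso
  simp only [Bool.and_eq_true, decide_eq_true_eq] at h1 h2
  obtain ⟨ha, hb⟩ := h1
  have hA : 65 ≤ c.toNat := ha
  have hB : c.toNat ≤ 90 := hb
  have hv : Nat.isValidChar (c.toNat + 32) := Or.inl (by omega)
  have ht : (Char.ofNat (c.toNat + 32)).toNat = c.toNat + 32 := by
    rw [Char.toNat_ofNat, if_pos hv]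
  obtain ⟨h2a, h2b⟩ := h2
  have h65 : 65 ≤ (Char.ofNat (c.toNat + 32)).toNat := h2a
  have h90 : (Char.ofNat (c.toNat + 32)).toNat ≤ 90 := h2b
  omega

lemma chainC_append (x y : List Char) : chainC (x ++ y) = chainC x ++ chainC y := by
  simp [chainC, replace_single, List.flatMap_append]

lemma chainC_flatMap (u : List Char) : chainC u = u.flatMap (fun c => chainC [c]) := by
  induction u with
  | nil => simp [chainC, replace_single]
  | cons c u ih =>
    have h : chainC (c :: u) = chainC [c] ++ chainC u := chainC_append [c] u
    rw [h, ih, List.flatMap_cons]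

set_option maxRecDepth 100000 in
lemma chainC_single (c : Char) : chainC [c] = trB c := by
  by_cases hK : c ∈ needleK
  · fin_cases hK <;> decide
  · simp only [needleK, List.mem_cons, List.not_mem_nil, or_false, not_or] at hK
    obtain ⟨h1, h2, h3, h4, h5, h6, h7, h8, h9, h10, h11, h12, h13, h14, h15, h16, h17, h18, h19, h20, h21, h22, h23, h24, h25, h26, h27, h28, h29, h30, h31, h32, h33, h34, h35, h36, h37, h38, h39, h40, h41, h42, h43, h44⟩ := hK
    have k1 : ('3' == c) = false := by simp; exact fun h => h42 h.symm
    have k2 : ('1' == c) = false := by simp; exact fun h => h43 h.symm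
    have k3 : ('0' == c) = false := by simp; exact fun h => h44 h.symm
    have hset : bDelete = " ._-#'+*~)`ß?=}{(!@$%^&[];:<>,/|\\‘’“”–—¡¿".toList := by decide
    simp [chainC, replace_single, trB, hset, PySem.Dict.getD, bSubst, PySem.Dict.ofList, PySem.Dict.get?, PySem.Dict.update, PySem.Dict.empty, PySem.Dict.insert, List.find?, k1, k2, k3,
      h1, h2, h3, h4, h5, h6, h7, h8, h9, h10, h11, h12, h13, h14, h15, h16, h17, h18, h19, h20, h21, h22, h23, h24, h25, h26, h27, h28, h29, h30, h31, h32, h33, h34, h35, h36, h37, h38, h39, h40, h41, h42, h43, h44]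

set_option maxRecDepth 8192 in
lemma good_e : GoodC 'e' := by constructor <;> decide
set_option maxRecDepth 8192 in
lemma good_g : GoodC 'g' := by constructor <;> decide

set_option maxRecDepth 8192 in
lemma good_i : GoodC 'i' := by constructor <;> decide
set_option maxRecDepth 8192 in
lemma good_o : GoodC 'o' := by constructor <;> decide

lemma toList_ee : ("ee" : String).toList = ['e', 'e'] := rfl
lemma toList_e : ("e" : String).toList = ['e'] := rfl
lemma toList_ggg : ("ggg" : String).toList = ['g', 'g', 'g'] := rfl
lemma toList_gg : ("gg" : String).toList = ['g', 'g'] := rfl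

lemma getD_miss (x : Char) (h3 : ¬ x = '3') (h1 : ¬ x = '1') (h0 : ¬ x = '0') :
    PySem.Dict.getD bSubst x x = x := by
  have k1 : ('3' == x) = false := by simp; exact fun h => h3 h.symm
  have k2 : ('1' == x) = false := by simp; exact fun h => h1 h.symm
  have k3 : ('0' == x) = false := by simp; exact fun h => h0 h.symm
  simp [PySem.Dict.getD, bSubst, PySem.Dict.ofList, PySem.Dict.get?, PySem.Dict.update,
    PySem.Dict.empty, PySem.Dict.insert, List.find?, k1, k2, k3]

lemma trB_good {c d : Char} (hd : d ∈ trB (PySem.Chars.lowerChar c)) : GoodC d := by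
  unfold trB at hd
  by_cases hdel : bDelete.contains (PySem.Chars.lowerChar c) = true
  · rw [if_pos hdel] at hd; simp at hd
  · rw [if_neg hdel] at hd
    simp only [List.mem_singleton] at hd
    by_cases e3 : PySem.Chars.lowerChar c = '3'
    · rw [e3] at hd; subst hd; exact good_e
    · by_cases e1 : PySem.Chars.lowerChar c = '1'
      · rw [e1] at hd; subst hd; exact good_i
      · by_cases e0 : PySem.Chars.lowerChar c = '0'
        · rw [e0] at hd; subst hd; exact good_o
        · rw [getD_miss _ e3 e1 e0] at hd
          subst hd
          refine ⟨lowerChar_idem c, ?_⟩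
          unfold trB
          rw [if_neg hdel, getD_miss _ e3 e1 e0]

lemma mem_collC {d : Char} (u : List Char) (hd : d ∈ collC u) :
    d ∈ u ∨ GoodC d := by
  unfold collC at hd
  rcases mem_replace _ _ _ (by simp) hd with h | h
  · rcases mem_replace _ _ _ (by simp) h with h' | h'
    · exact Or.inl h'
    · right; simp at h'; subst h'; exact good_e
  · right; simp at h; subst h; exact good_g

-- one round of A, on char lists
def stepC (w : List Char) : List Char :=
  collC (w.flatMap (fun c => trB (PySem.Chars.lowerChar c)))

lemma bypassStep_toList (t : String) : (bypassStep t).toList = stepC t.toList := by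
  have h1 : (bypassStep t).toList = collC (chainC (PySem.Chars.lower t.toList)) := by
    simp only [bypassStep, PySem.Str.toList_replace, PySem.Str.toList_lower]
    rfl
  rw [h1, chainC_flatMap]
  simp only [chainC_single]
  unfold stepC
  simp [PySem.Chars.lower, List.flatMap_map]

lemma good_stepC (w : List Char) : ∀ d ∈ stepC w, GoodC d := by
  intro d hd
  rcases mem_collC _ hd with h | h
  · rcases List.mem_flatMap.mp h with ⟨c, _, hdc⟩
    exact trB_good hdc
  · exact h

lemma stepC_of_good (w : List Char) (h : ∀ d ∈ w, GoodC d) : stepC w = collC w := by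
  unfold stepC
  congr 1
  induction w with
  | nil => simp
  | cons c w ih =>
    have hc := h c (by simp)
    rw [List.flatMap_cons, hc.1, hc.2, ih (fun d hd => h d (by simp [hd]))]
    rfl

lemma loop_eq (n : Nat) : ∀ (t : String), (∀ d ∈ t.toList, GoodC d) →
    bypassLoop n t = bCollapse n t := by
  induction n with
  | zero => intro t _; rfl
  | succ n ih =>
    intro t h
    have h2 : (PySem.Str.replace (PySem.Str.replace t "ee" "e") "ggg" "gg").toList
        = collC t.toList := by
      simp only [PySem.Str.toList_replace, toList_ee, toList_e, toList_ggg, toList_gg]; rfl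
    have hstep : bypassStep t = PySem.Str.replace (PySem.Str.replace t "ee" "e") "ggg" "gg" := by
      have h1 : (bypassStep t).toList = collC t.toList := by
        rw [bypassStep_toList, stepC_of_good t.toList h]
      have h12 := h1.trans h2.symm
      have := congrArg String.ofList h12
      simpa only [String.ofList_toList] using this
    have hgood : ∀ d ∈ (PySem.Str.replace (PySem.Str.replace t "ee" "e") "ggg" "gg").toList, GoodC d := by
      intro d hd
      rw [h2] at hd
      rcases mem_collC _ hd with h' | h'
      · exact h d h'
      · exact h'
    rw [bypassLoop, bCollapse, hstep]
    exact ih _ hgood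

lemma filter_map_eq_flatMap (u : List Char) :
    (u.filter (fun c => !(bDelete.contains c))).map (fun c => PySem.Dict.getD bSubst c c)
      = u.flatMap trB := by
  induction u with
  | nil => rfl
  | cons c u ih =>
    cases hc : bDelete.contains c with
    | true =>
      have hmem : c ∈ bDelete := by simpa using hc
      have ht : trB c = [] := by simp [trB, hmem]
      simp only [List.filter_cons, hc, Bool.not_true, Bool.false_eq_true, if_false,
        List.flatMap_cons, ht, List.nil_append, ih]
    | false =>
      have hmem : c ∉ bDelete := by simpa using hc
      have ht : trB c = [PySem.Dict.getD bSubst c c] := by simp [trB, hmem]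
      simp only [List.filter_cons, hc, Bool.not_false, if_true, List.map_cons,
        List.flatMap_cons, ht, List.cons_append, List.nil_append, ih]

theorem bypass_eq_alt (text : String) : bypass text = bypass_alt text := by
  unfold bypass bypass_alt
  set N := String.ofList (((PySem.Str.lower text).toList.filter (fun c => !(bDelete.contains c))).map
    (fun c => PySem.Dict.getD bSubst c c)) with hN
  have hNl : N.toList = text.toList.flatMap (fun c => trB (PySem.Chars.lowerChar c)) := by
    rw [hN, String.toList_ofList, filter_map_eq_flatMap, PySem.Str.toList_lower]
    simp [PySem.Chars.lower, List.flatMap_map]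
  have hstepl : (bypassStep text).toList
      = (PySem.Str.replace (PySem.Str.replace N "ee" "e") "ggg" "gg").toList := by
    rw [bypassStep_toList]
    simp only [PySem.Str.toList_replace, toList_ee, toList_e, toList_ggg, toList_gg]
    rw [hNl]
    rfl
  have hstep : bypassStep text = PySem.Str.replace (PySem.Str.replace N "ee" "e") "ggg" "gg" := by
    have := congrArg String.ofList hstepl
    simpa only [String.ofList_toList] using this
  have hgood : ∀ d ∈ (bypassStep text).toList, GoodC d := by
    rw [bypassStep_toList]; exact good_stepC _
  rw [bypassLoop, bCollapse, hstep]
  exact loop_eq 9 _ (hstep ▸ hgood)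

-- ===== VERDICT (by name: the statement is the Claim_ definition above) =====
theorem bypass_spec : Claim_equal_bypass := by
  intro text _
  unfold Spec_bypass
  exact bypass_eq_alt text
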